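-- pv_equiv track=rewrite | github.com/AP-MI-2021/lab-4-andrey100f | main.py | suma_elemente_pozitive
-- ===== SOURCE A (Python) =====
-- def suma_elemente_pozitive(lista, n):
--     """
--     Calculeaza suma a primelor n numere pozitive dintr-o lista
--     :param lista: o lista de numere intregi
--     :param n: o valoare intreaga
--     :return: o valoare intreaga
--     """
--     suma = 0
--     pozitie = 0
--     for i in range(len(lista)):
--         if lista[i] >= 0:
--             suma = suma + lista[i]
--             pozitie = pozitie + 1
--             if pozitie == n:
--                 return suma
--     return None
-- ===== SOURCE B (Python) =====
-- def suma_elemente_pozitive(lista, n):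
--     """
--     Calculeaza suma a primelor n numere pozitive dintr-o lista
--     :param lista: o lista de numere intregi
--     :param n: o valoare intreaga
--     :return: o valoare intreaga
--     """
--     pozitive = [x for x in lista if x >= 0]
--     if n <= 0 or len(pozitive) < n:
--         return None
--     return sum(pozitive[:n])
-- ===== Notes on version B (the rewrite author's own statement) =====
-- stated objective: simpler
-- what changed: Replaces the fused scan with running sum/counter and mid-loop early return by a filter-then-slice-then-sum decomposition with an up-front count check.
import Mathlib
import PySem

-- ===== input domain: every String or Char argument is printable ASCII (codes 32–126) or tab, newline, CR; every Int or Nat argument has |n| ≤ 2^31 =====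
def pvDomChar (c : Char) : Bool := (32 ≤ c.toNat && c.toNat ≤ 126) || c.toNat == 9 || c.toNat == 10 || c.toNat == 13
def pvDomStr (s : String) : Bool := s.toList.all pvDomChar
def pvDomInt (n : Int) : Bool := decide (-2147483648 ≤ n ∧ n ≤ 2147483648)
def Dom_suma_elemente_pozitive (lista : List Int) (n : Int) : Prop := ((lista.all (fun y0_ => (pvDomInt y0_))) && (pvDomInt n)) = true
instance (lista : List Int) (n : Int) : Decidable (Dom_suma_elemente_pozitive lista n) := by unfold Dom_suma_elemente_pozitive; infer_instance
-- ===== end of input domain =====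

-- B replaces A's fused scan (running sum/counter with a mid-loop early return) by a
-- filter-then-slice-then-sum decomposition with an up-front count check; objective: simpler.


-- ===== PORT A =====
-- literal transliteration of A's index loop as structural recursion over the list,
-- carrying the same (suma, pozitie) state with the same mid-loop early return
def sumaLoopA (xs : List Int) (suma pozitie n : Int) : Option Int :=
  match xs with
  | [] => none
  | x :: t =>
    if x ≥ 0 then
      let suma' := suma + x
      let poz' := pozitie + 1
      if poz' = n then some suma' else sumaLoopA t suma' poz' n
    else sumaLoopA t suma pozitie n

def suma_elemente_pozitive (lista : List Int) (n : Int) : Option Int :=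
  sumaLoopA lista 0 0 n

-- ===== PORT B =====
-- pozitive[:n] is taken only when n ≥ 1, where Python's slice equals List.take n.toNat (exact there)
def suma_elemente_pozitive_alt (lista : List Int) (n : Int) : Option Int :=
  let pozitive := lista.filter (fun x => decide (x ≥ 0))
  if n ≤ 0 ∨ (pozitive.length : Int) < n then none
  else some (pozitive.take n.toNat).sum

-- ===== PRECONDITION & SPEC =====
def Spec_suma_elemente_pozitive (lista : List Int) (n : Int) (out : Option Int) : Prop := out = suma_elemente_pozitive_alt lista n
instance (lista : List Int) (n : Int) (out : Option Int) : Decidable (Spec_suma_elemente_pozitive lista n out) := by unfold Spec_suma_elemente_pozitive; infer_instance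

-- ===== CLAIM (what is proved, stated in full; the proofs are below) =====
def Claim_equal_suma_elemente_pozitive : Prop := ∀ (lista : List Int) (n : Int), Dom_suma_elemente_pozitive lista n → Spec_suma_elemente_pozitive lista n (suma_elemente_pozitive lista n)

-- ===== LEMMAS AND PROOFS =====

-- ===== VERDICT (by name: the statement is the Claim_ definition above) =====
lemma sumaLoopA_eq (xs : List Int) (suma pozitie n : Int) :
    sumaLoopA xs suma pozitie n =
      (let P := xs.filter (fun x => decide (x ≥ 0))
       if n - pozitie ≤ 0 ∨ (P.length : Int) < n - pozitie then none
       else some (suma + (P.take (n - pozitie).toNat).sum)) := by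
  induction xs generalizing suma pozitie with
  | nil =>
    simp only [List.filter_nil, List.length_nil, sumaLoopA]
    rw [if_pos (by push_cast; omega)]
  | cons x t ih =>
    by_cases hx : x ≥ 0
    · have hf : (x :: t).filter (fun x => decide (x ≥ 0))
          = x :: t.filter (fun x => decide (x ≥ 0)) := by simp [hx]
      simp only [sumaLoopA, if_pos hx, hf]
      by_cases hn : pozitie + 1 = n
      · have h1 : n - pozitie = 1 := by omega
        rw [if_pos hn, h1]
        have hc : ¬((1 : Int) ≤ 0 ∨
            (((x :: t.filter (fun x => decide (x ≥ 0))).length : Int) < 1)) := by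
          simp only [List.length_cons]
          push_cast
          simp
        rw [if_neg hc]
        simp
      · rw [if_neg hn, ih]
        simp only []
        by_cases hb : n - (pozitie + 1) ≤ 0 ∨
            ((t.filter (fun x => decide (x ≥ 0))).length : Int) < n - (pozitie + 1)
        · rw [if_pos hb, if_pos (by simp only [List.length_cons]; push_cast; omega)]
        · rw [if_neg hb, if_neg (by simp only [List.length_cons] at *; push_cast at *; omega)]
          have h1 : (n - pozitie).toNat = (n - (pozitie + 1)).toNat + 1 := by omega
          rw [h1, List.take_succ_cons, List.sum_cons]
          congr 1
          ring
    · have hf : (x :: t).filter (fun x => decide (x ≥ 0))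
          = t.filter (fun x => decide (x ≥ 0)) := by simp [hx]
      simp only [sumaLoopA, if_neg hx, hf]
      exact ih suma pozitie

theorem suma_elemente_pozitive_spec : Claim_equal_suma_elemente_pozitive := by
  intro lista n _
  unfold Spec_suma_elemente_pozitive suma_elemente_pozitive suma_elemente_pozitive_alt
  rw [sumaLoopA_eq]
  simp only [sub_zero, zero_add]
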